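-- pv_equiv track=rewrite | github.com/superhy/Novo-path-V10 | interpre/prep_dect_vis.py | abs_nb_sensi_clst_single_slide
-- ===== SOURCE A (Python) =====
-- def abs_nb_sensi_clst_single_slide(slide_tile_clst_tuples, sensi_clsts):
--     '''
--     Return:
--         abs_number_dict: a dictionary of tissue percentage of each sensitive clusters
--     '''
--     # initial
--     abs_number_dict = {}
--
--     for lbl in sensi_clsts:
--         abs_number_dict[lbl] = 0
--
--     for i, t_l_tuple in enumerate(slide_tile_clst_tuples):
--         _, label = t_l_tuple
--         if label in sensi_clsts:
--             abs_number_dict[label] += 1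
--
--     return abs_number_dict
-- ===== SOURCE B (Python) =====
-- def abs_nb_sensi_clst_single_slide(slide_tile_clst_tuples, sensi_clsts):
--     '''
--     Return:
--         abs_number_dict: a dictionary of tissue percentage of each sensitive clusters
--     '''
--     labels = [label for _, label in slide_tile_clst_tuples]
--     return {lbl: labels.count(lbl) for lbl in sensi_clsts}
-- ===== Notes on version B (the rewrite author's own statement) =====
-- stated objective: simpler
-- what changed: Flips the loop nesting: instead of A's single pass over tiles with a per-tile membership test and in-place dict increments on a pre-zeroed dict, B extracts the label list once and builds the result in one staged pass over sensi_clsts, counting each sensitive label directly with list.count.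
import Mathlib
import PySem

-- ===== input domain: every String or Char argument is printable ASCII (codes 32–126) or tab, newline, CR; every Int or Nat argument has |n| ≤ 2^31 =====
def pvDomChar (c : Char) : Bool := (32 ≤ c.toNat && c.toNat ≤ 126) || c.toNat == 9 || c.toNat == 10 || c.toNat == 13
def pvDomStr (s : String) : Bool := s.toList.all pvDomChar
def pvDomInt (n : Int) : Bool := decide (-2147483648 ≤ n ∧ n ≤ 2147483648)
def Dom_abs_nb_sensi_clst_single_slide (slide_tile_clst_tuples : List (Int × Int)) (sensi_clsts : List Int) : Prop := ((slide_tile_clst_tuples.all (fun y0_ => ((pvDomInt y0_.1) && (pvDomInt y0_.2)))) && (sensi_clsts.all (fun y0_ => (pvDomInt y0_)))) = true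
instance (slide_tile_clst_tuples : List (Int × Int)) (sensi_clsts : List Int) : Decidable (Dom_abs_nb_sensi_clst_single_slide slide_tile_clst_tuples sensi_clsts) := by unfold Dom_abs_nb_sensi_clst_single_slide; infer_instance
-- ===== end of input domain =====

-- ===== PORT A =====
-- B flips the loop nesting: it extracts the label list once and counts each sensitive label
-- directly with list.count in a staged pass over sensi_clsts, instead of A's single tile pass
-- with a per-tile membership test incrementing a pre-zeroed dict (same O(n*s) cost).
-- Literal port of A: zero-init dict over sensi_clsts, then enumerate loop; `abs_number_dict[label] += 1`
-- is a guarded read-modify-write on a key guaranteed present (inserted in the first loop), ported as modify.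
def abs_nb_sensi_clst_single_slide (slide_tile_clst_tuples : List (Int × Int)) (sensi_clsts : List Int) : List (Int × Int) :=
  let d0 : PySem.Dict Int Int := sensi_clsts.foldl (fun d lbl => d.insert lbl 0) PySem.Dict.empty
  let d : PySem.Dict Int Int :=
    (PySem.List.enumerate slide_tile_clst_tuples).foldl
      (fun d p =>
        if sensi_clsts.contains p.2.2 then d.modify p.2.2 0 (· + 1) else d) d0
  d.items

-- ===== PORT B =====
-- Port of Source B: labels = [label for _, label in tiles]; {lbl: labels.count(lbl) for lbl in sensi_clsts}
def abs_nb_sensi_clst_single_slide_alt (slide_tile_clst_tuples : List (Int × Int)) (sensi_clsts : List Int) : List (Int × Int) :=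
  let labels : List Int := slide_tile_clst_tuples.map (fun t => t.2)
  (sensi_clsts.foldl (fun d lbl => d.insert lbl (PySem.List.count labels lbl)) PySem.Dict.empty).items

-- ===== PRECONDITION & SPEC =====
def Spec_abs_nb_sensi_clst_single_slide (slide_tile_clst_tuples : List (Int × Int)) (sensi_clsts : List Int) (out : List (Int × Int)) : Prop := out = abs_nb_sensi_clst_single_slide_alt slide_tile_clst_tuples sensi_clsts
instance (slide_tile_clst_tuples : List (Int × Int)) (sensi_clsts : List Int) (out : List (Int × Int)) : Decidable (Spec_abs_nb_sensi_clst_single_slide slide_tile_clst_tuples sensi_clsts out) := by unfold Spec_abs_nb_sensi_clst_single_slide; infer_instance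

-- ===== CLAIM (what is proved, stated in full; the proofs are below) =====
def Claim_equal_abs_nb_sensi_clst_single_slide : Prop := ∀ (slide_tile_clst_tuples : List (Int × Int)) (sensi_clsts : List Int), Dom_abs_nb_sensi_clst_single_slide slide_tile_clst_tuples sensi_clsts → Spec_abs_nb_sensi_clst_single_slide slide_tile_clst_tuples sensi_clsts (abs_nb_sensi_clst_single_slide slide_tile_clst_tuples sensi_clsts)

-- ===== LEMMAS AND PROOFS =====

-- value after A's conditional increment loop: each key gains its label-count if it is sensitive
theorem pv_getD_loopA (sensi : List Int) (l : List (Int × (Int × Int))) (d : PySem.Dict Int Int) (k : Int) :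
    (l.foldl (fun d p => if sensi.contains p.2.2 then d.modify p.2.2 0 (· + 1) else d) d).getD k 0
      = d.getD k 0 + (if sensi.contains k then ((l.map (·.2.2)).count k : Int) else 0) := by
  induction l generalizing d with
  | nil => simp
  | cons p rest ih =>
      simp only [List.foldl_cons, List.map_cons]
      by_cases hp : sensi.contains p.2.2
      · rw [if_pos hp, ih]
        rw [PySem.Dict.getD_modify]
        by_cases hk : k = p.2.2
        · subst hk
          rw [if_pos rfl, if_pos hp, if_pos hp, List.count_cons_self]
          push_cast; ring
        · rw [if_neg hk, List.count_cons_of_ne (fun h => hk h.symm)]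
      · rw [if_neg hp, ih]
        by_cases hk : k = p.2.2
        · subst hk; rw [if_neg hp, if_neg hp]
        · rw [List.count_cons_of_ne (fun h => hk h.symm)]

-- keys after A's conditional increment loop stay fixed when every sensitive label is already a key
theorem pv_keys_loopA (sensi : List Int) (l : List (Int × (Int × Int))) (d : PySem.Dict Int Int)
    (h : ∀ j, sensi.contains j → d.contains j = true) :
    (l.foldl (fun d p => if sensi.contains p.2.2 then d.modify p.2.2 0 (· + 1) else d) d).keys = d.keys := by
  induction l generalizing d with
  | nil => rfl
  | cons p rest ih =>
      simp only [List.foldl_cons]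
      by_cases hp : sensi.contains p.2.2
      · rw [if_pos hp]
        have hc : d.contains p.2.2 = true := h _ hp
        have hk : (d.modify p.2.2 0 (· + 1)).keys = d.keys := by
          rw [PySem.Dict.keys_modify, PySem.Dict.keys_insert_of_contains _ _ hc]
        rw [ih _ (fun j hj => by rw [PySem.Dict.contains_modify]; simp [h j hj]), hk]
      · rw [if_neg hp]; exact ih d h

-- fold inserting a key-determined value: lookup after the fold
theorem pv_getD_foldl_insert_fun (w : Int → Int) (l : List Int) (d : PySem.Dict Int Int) (k : Int) :
    (l.foldl (fun d x => d.insert x (w x)) d).getD k 0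
      = if k ∈ l then w k else d.getD k 0 := by
  induction l generalizing d with
  | nil => simp
  | cons x rest ih =>
      simp only [List.foldl_cons, ih, List.mem_cons]
      by_cases hk : k ∈ rest
      · simp [hk]
      · rw [if_neg hk, PySem.Dict.getD_insert]
        by_cases he : k = x
        · simp [he]
        · simp [he, hk]

-- nodup keys for such a fold
theorem pv_nodup_keys_foldl_insert_fun (w : Int → Int) (l : List Int) :
    (l.foldl (fun d x => d.insert x (w x)) (PySem.Dict.empty : PySem.Dict Int Int)).keys.Nodup :=
  PySem.Dict.nodup_keys_foldl_insert l (fun _ x => w x) _ (by simp)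

-- keys of such a fold = dedup of l
theorem pv_keys_foldl_insert_fun (w : Int → Int) (l : List Int) :
    (l.foldl (fun d x => d.insert x (w x)) (PySem.Dict.empty : PySem.Dict Int Int)).keys
      = PySem.Set.ofList l := by
  rw [PySem.Dict.keys_foldl_insert]
  simp [PySem.Dict.keys_empty, PySem.Set.update_nil_left]

-- ===== VERDICT (by name: the statement is the Claim_ definition above) =====
theorem abs_nb_sensi_clst_single_slide_spec : Claim_equal_abs_nb_sensi_clst_single_slide := by
  intro tiles sensi _
  unfold Spec_abs_nb_sensi_clst_single_slide
  unfold abs_nb_sensi_clst_single_slide abs_nb_sensi_clst_single_slide_alt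
  -- A's zero-init dict
  set d0 : PySem.Dict Int Int := sensi.foldl (fun d lbl => d.insert lbl 0) PySem.Dict.empty with hd0
  have hd0' : d0 = sensi.foldl (fun d x => d.insert x ((fun _ => (0:Int)) x)) PySem.Dict.empty := rfl
  have hd0keys : d0.keys = PySem.Set.ofList sensi := by
    rw [hd0']; exact pv_keys_foldl_insert_fun _ sensi
  have hd0nodup : d0.keys.Nodup := by rw [hd0']; exact pv_nodup_keys_foldl_insert_fun _ sensi
  have hd0contains : ∀ j, sensi.contains j → d0.contains j = true := by
    intro j hj
    rw [PySem.Dict.contains_iff_mem_keys, hd0keys]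
    exact (PySem.Set.mem_ofList _ _).mpr (by simpa using hj)
  set dA := (PySem.List.enumerate tiles).foldl
      (fun d p => if sensi.contains p.2.2 then d.modify p.2.2 0 (· + 1) else d) d0 with hdA
  have hAkeys : dA.keys = PySem.Set.ofList sensi := by
    rw [hdA, pv_keys_loopA sensi _ d0 hd0contains, hd0keys]
  have hAnodup : dA.keys.Nodup := by rw [hAkeys, ← hd0keys]; exact hd0nodup
  -- per-key value of dA
  have hAval : ∀ k, k ∈ sensi → dA.getD k 0 = ((tiles.map (·.2)).count k : Int) := by
    intro k hk
    rw [hdA, pv_getD_loopA]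
    have hmap : (PySem.List.enumerate tiles).map (·.2.2) = tiles.map (·.2) := by
      have h2 := PySem.List.map_snd_enumerate tiles (0 : Int)
      rw [show ((·.2.2) : Int × (Int × Int) → Int) = (·.2) ∘ (·.2) from rfl, ← List.map_map, h2]
    have hk' : sensi.contains k := by simpa using hk
    rw [hmap, if_pos hk']
    rw [hd0', pv_getD_foldl_insert_fun]
    simp [hk]
  -- B's output dict
  set dB : PySem.Dict Int Int := sensi.foldl
      (fun d lbl => d.insert lbl (PySem.List.count (tiles.map (fun t => t.2)) lbl)) PySem.Dict.empty with hdB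
  show dA.items = dB.items
  have hBkeys : dB.keys = PySem.Set.ofList sensi := pv_keys_foldl_insert_fun _ sensi
  have hBnodup : dB.keys.Nodup := pv_nodup_keys_foldl_insert_fun _ sensi
  have hBval : ∀ k, k ∈ sensi → dB.getD k 0 = ((tiles.map (·.2)).count k : Int) := by
    intro k hk
    rw [hdB, pv_getD_foldl_insert_fun]
    rw [if_pos hk, PySem.List.count_eq]
  rw [PySem.Dict.items_eq_map_keys dA hAnodup 0, PySem.Dict.items_eq_map_keys dB hBnodup 0,
    hAkeys, hBkeys]
  apply List.map_congr_left
  intro k hk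
  have hk' : k ∈ sensi := (PySem.Set.mem_ofList _ _).mp hk
  rw [hAval k hk', hBval k hk']
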